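-- pv_equiv track=rewrite | github.com/andrewmarriott/NewMusicFriday-TwitterStream | global_functions.py | convert_to_topic
-- ===== SOURCE A (Python) =====
-- def convert_to_topic(i):
-- 	#take out non ascii characters
-- 	i = i.encode('ascii',errors='ignore')
-- 	i = i.decode()
--     	#if invalid topic character in i replace with '-'
-- 	invalid_chars = ["!","@","#",
-- 					"$","%","^",
-- 					"&","*","(",
-- 					")","+","<",
-- 					">",":","?",
-- 					"/",".",",",
-- 					"|","`","~"]
-- 	for char in invalid_chars:
-- 		if char in i:
-- 			i = i.replace(char, '-')
--     	#take out spaces and add to topic_name list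
-- 	return i.replace(" ", "")
-- ===== SOURCE B (Python) =====
-- _INVALID = frozenset("!@#$%^&*()+<>:?/.,|`~")
--
-- def convert_to_topic(i):
--     # take out non ascii characters
--     i = i.encode('ascii', errors='ignore').decode()
--     # single pass: drop spaces, map invalid topic characters to '-'
--     out = []
--     for ch in i:
--         if ch == ' ':
--             continue
--         out.append('-' if ch in _INVALID else ch)
--     return ''.join(out)
-- ===== Notes on version B (the rewrite author's own statement) =====
-- stated objective: simpler
-- what changed: Replaced 21 sequential whole-string membership-test-plus-replace passes and a final space-stripping replace by one character-classification pass (frozenset lookup, skip spaces, emit '-' or the char) joined at the end.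
import Mathlib
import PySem

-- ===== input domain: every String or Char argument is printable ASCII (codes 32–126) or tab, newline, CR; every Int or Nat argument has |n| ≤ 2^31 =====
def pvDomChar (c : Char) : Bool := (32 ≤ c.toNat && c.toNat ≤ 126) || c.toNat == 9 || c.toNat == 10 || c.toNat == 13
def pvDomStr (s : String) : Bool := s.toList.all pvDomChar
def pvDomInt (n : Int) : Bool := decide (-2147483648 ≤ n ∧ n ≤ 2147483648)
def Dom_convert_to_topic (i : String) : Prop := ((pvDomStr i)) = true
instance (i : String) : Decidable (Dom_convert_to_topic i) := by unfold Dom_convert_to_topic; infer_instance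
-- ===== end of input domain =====

-- B replaces A's 21 sequential whole-string replace passes (plus a final space-stripping
-- replace) with a single character-classification pass; objective: simpler, same result.

-- ===== PORT A =====
-- i.encode('ascii', errors='ignore').decode(): keeps exactly the code points < 128
def pvAsciiIgnore (i : String) : String :=
  String.ofList (i.toList.filter (fun c => c.toNat ≤ 127))

def pvInvalidChars : List String :=
  ["!", "@", "#", "$", "%", "^", "&", "*", "(", ")", "+", "<", ">", ":", "?", "/", ".", ",", "|", "`", "~"]

def convert_to_topic (i : String) : String :=
  let i1 := pvAsciiIgnore i
  let i2 := pvInvalidChars.foldl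
    (fun s ch => if PySem.Str.isIn ch s then PySem.Str.replace s ch "-" else s) i1
  PySem.Str.replace i2 " " ""

-- ===== PORT B =====
def pvInvalidSet : PySem.Set Char :=
  PySem.Set.ofList ['!', '@', '#', '$', '%', '^', '&', '*', '(', ')', '+', '<', '>', ':', '?', '/', '.', ',', '|', '`', '~']

-- one char: skip if space, '-' if invalid, else the char itself
def pvClassify (c : Char) : Option Char :=
  if c == ' ' then none
  else if pvInvalidSet.contains c then some '-'
  else some c

def convert_to_topic_alt (i : String) : String :=
  String.ofList ((i.toList.filter (fun c => c.toNat ≤ 127)).filterMap pvClassify)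

-- ===== PRECONDITION & SPEC =====
def Spec_convert_to_topic (i : String) (out : String) : Prop := out = convert_to_topic_alt i
instance (i : String) (out : String) : Decidable (Spec_convert_to_topic i out) := by unfold Spec_convert_to_topic; infer_instance

-- ===== CLAIM (what is proved, stated in full; the proofs are below) =====
def Claim_equal_convert_to_topic : Prop := ∀ (i : String), Dom_convert_to_topic i → Spec_convert_to_topic i (convert_to_topic i)

-- ===== LEMMAS AND PROOFS =====

-- the invalid characters as a plain char list (proof-side view of both ports' tables)
def pvInvList : List Char :=
  ['!', '@', '#', '$', '%', '^', '&', '*', '(', ')', '+', '<', '>', ':', '?', '/', '.', ',', '|', '`', '~']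

-- replace.go with a single-char pattern is a flatMap over the characters
theorem pv_go_singleton (c : Char) (new l acc : List Char) (fuel : Nat) (h : l.length ≤ fuel) :
    PySem.Chars.replace.go [c] new fuel l acc
      = acc.reverse ++ l.flatMap (fun x => if x = c then new else [x]) := by
  induction l generalizing fuel acc with
  | nil => cases fuel <;> simp [PySem.Chars.replace.go]
  | cons x t ih =>
    cases fuel with
    | zero => simp at h
    | succ n =>
      rw [PySem.Chars.replace.go]
      by_cases hx : x = c
      · subst hx
        simp [List.isPrefixOf, ih _ _ (by simpa using h)]
      · simp [List.isPrefixOf, Ne.symm hx, hx, ih _ _ (by simpa using h)]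

theorem pv_replace_single (c r : Char) (s : List Char) :
    PySem.Chars.replace s [c] [r] = s.map (fun x => if x = c then r else x) := by
  rw [PySem.Chars.replace]
  simp [pv_go_singleton c [r] s [] s.length le_rfl]
  induction s with
  | nil => simp
  | cons x t ih => by_cases hx : x = c <;> simp [hx, ih]

theorem pv_replace_del (c : Char) (s : List Char) :
    PySem.Chars.replace s [c] [] = s.filter (fun x => x ≠ c) := by
  rw [PySem.Chars.replace]
  simp [pv_go_singleton c [] s [] s.length le_rfl]
  induction s with
  | nil => simp
  | cons x t ih => by_cases hx : x = c <;> simp [hx, ih]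

theorem pv_isIn_singleton (c : Char) (s : List Char) :
    PySem.Chars.isIn [c] s = true ↔ c ∈ s := by
  rw [PySem.Chars.isIn_iff_infix]
  constructor
  · intro h; exact h.sublist.mem (List.mem_singleton_self c)
  · intro h
    obtain ⟨pre, suf, rfl⟩ := List.append_of_mem h
    exact ⟨pre, suf, by simp⟩

-- one guarded replace pass = a character map
theorem pv_step_eq (c : Char) (s : List Char) :
    (if PySem.Chars.isIn [c] s then PySem.Chars.replace s [c] ['-'] else s)
      = s.map (fun x => if x = c then '-' else x) := by
  split
  · exact pv_replace_single c '-' s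
  · next hni =>
    have hc : c ∉ s := by
      intro hm
      exact hni ((pv_isIn_singleton c s).mpr hm)
    have hmapid : ∀ x ∈ s, (if x = c then '-' else x) = id x := by
      intro x hx
      have hxc : ¬ x = c := fun h => hc (h ▸ hx)
      simp [hxc]
    rw [List.map_congr_left hmapid]
    simp

-- the chain of guarded single-char replace passes = one classification map
theorem pv_chain (L : List Char) (hL : '-' ∉ L) (cs : List Char) :
    (L.map (fun c => [c])).foldl
        (fun s cc => if PySem.Chars.isIn cc s then PySem.Chars.replace s cc ['-'] else s) cs
      = cs.map (fun x => if x ∈ L then '-' else x) := by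
  induction L generalizing cs with
  | nil => simp
  | cons c t ih =>
    have hdt : '-' ∉ t := fun h => hL (List.mem_cons_of_mem _ h)
    simp only [List.map_cons, List.foldl_cons, pv_step_eq, ih hdt, List.map_map]
    refine List.map_congr_left (fun x _ => ?_)
    by_cases hx : x = c
    · subst hx; simp
    · by_cases hxt : x ∈ t <;> simp [hx, hxt]

-- the Str-level fold of A equals the Chars-level fold on toList
theorem pv_fold_toList (L : List String) (s : String) :
    (L.foldl (fun s ch => if PySem.Str.isIn ch s then PySem.Str.replace s ch "-" else s) s).toList
      = (L.map String.toList).foldl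
          (fun s cc => if PySem.Chars.isIn cc s then PySem.Chars.replace s cc ['-'] else s) s.toList := by
  induction L generalizing s with
  | nil => simp
  | cons ch t ih =>
    simp only [List.foldl_cons, List.map_cons, ih]
    congr 1
    by_cases h : PySem.Chars.isIn ch.toList s.toList = true
    · rw [if_pos (by simpa [PySem.Str.isIn] using h), if_pos h]
      simp [PySem.Str.replace]
    · rw [if_neg (by simpa [PySem.Str.isIn] using h), if_neg h]

-- the two ports' invalid-character tables hold the same characters
theorem pv_mem_set (c : Char) : c ∈ pvInvalidSet ↔ c ∈ pvInvList := by
  rw [pvInvalidSet, PySem.Set.mem_ofList]; exact Iff.rfl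

-- fusing A's classification map and space filter into B's single filterMap
theorem pv_fuse (cs : List Char) :
    ((cs.map (fun x => if x ∈ pvInvList then '-' else x)).filter (fun x => x ≠ ' '))
      = cs.filterMap pvClassify := by
  induction cs with
  | nil => simp
  | cons c t ih =>
    rw [List.map_cons, List.filterMap_cons, List.filter_cons]
    by_cases hsp : c = ' '
    · subst hsp
      rw [if_neg (by decide : ¬ ((' ' : Char) ∈ pvInvList))]
      rw [if_neg (by decide : ¬ (decide ((' ' : Char) ≠ ' ') = true))]
      rw [show pvClassify ' ' = none from by decide]
      exact ih
    · have hcl : pvClassify c = some (if c ∈ pvInvList then '-' else c) := by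
        by_cases hinv : c ∈ pvInvList <;>
          simp [pvClassify, hsp, hinv, pv_mem_set]
      rw [hcl]
      by_cases hinv : c ∈ pvInvList
      · rw [if_pos hinv]
        rw [if_pos (by decide : decide (('-' : Char) ≠ ' ') = true)]
        exact congrArg _ ih
      · rw [if_neg hinv]
        rw [if_pos (show decide (c ≠ ' ') = true by simp [hsp])]
        exact congrArg _ ih

-- ===== VERDICT (by name: the statement is the Claim_ definition above) =====
set_option maxRecDepth 4096 in
theorem convert_to_topic_spec : Claim_equal_convert_to_topic := by
  intro i _
  unfold Spec_convert_to_topic convert_to_topic convert_to_topic_alt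
  rw [show ∀ s : String, PySem.Str.replace s " " "" = String.ofList (PySem.Chars.replace s.toList [' '] []) from fun _ => rfl]
  refine congrArg String.ofList ?_
  rw [pv_replace_del, pv_fold_toList]
  have hmap : pvInvalidChars.map String.toList = pvInvList.map (fun c => [c]) := rfl
  rw [hmap, pv_chain pvInvList (by decide)]
  simp only [pvAsciiIgnore, String.toList_ofList]
  exact pv_fuse _
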